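-- pv_equiv track=rewrite | github.com/Teom99/dnd-tracker | json/explore_classes.py | fuzzy_class
-- ===== SOURCE A (Python) =====
-- def fuzzy_class(data, name):
--     """Trova la classe con match case-insensitive parziale."""
--     name_l = name.lower()
--     exact = next((k for k in data if k.lower() == name_l), None)
--     if exact:
--         return exact
--     matches = [k for k in data if k.lower().startswith(name_l)]
--     if len(matches) == 1:
--         return matches[0]
--     matches2 = [k for k in data if name_l in k.lower()]
--     if len(matches2) == 1:
--         return matches2[0]
--     return None
-- ===== SOURCE B (Python) =====
-- def fuzzy_class(data, name):
--     """Classify each key into exactly one disjoint tier (0 exact, 1 proper prefix,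
--     2 proper substring) via an if/elif chain, keeping only a count and the first
--     key per tier; since exact => prefix => substring, the prefix-match count is
--     counts[0]+counts[1] and the substring-match count is the total, so the match
--     lists of A are never built."""
--     name_l = name.lower()
--     counts = [0, 0, 0]
--     firsts = [None, None, None]
--     for k in data:
--         kl = k.lower()
--         if kl == name_l:
--             t = 0
--         elif kl.startswith(name_l):
--             t = 1
--         elif name_l in kl:
--             t = 2
--         else:
--             continue
--         if firsts[t] is None:
--             firsts[t] = k
--         counts[t] += 1
--     if firsts[0]:
--         return firsts[0]
--     if counts[0] + counts[1] == 1: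
--         return firsts[0] if counts[0] else firsts[1]
--     if counts[0] + counts[1] + counts[2] == 1:
--         return firsts[0] if counts[0] else firsts[1] if counts[1] else firsts[2]
--     return None
-- ===== Notes on version B (the rewrite author's own statement) =====
-- stated objective: alternative
-- what changed: B classifies each key once, via an if/elif chain, into exactly one of three disjoint tiers (exact / proper prefix / proper substring) and keeps only a count and the first key per tier, then exploits the nesting exact=>prefix=>substring to recover A's prefix-match count as counts[0]+counts[1] and its substring-match count as the total, so A's materialized match lists and its three separate scans disappear.
import Mathlib
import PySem

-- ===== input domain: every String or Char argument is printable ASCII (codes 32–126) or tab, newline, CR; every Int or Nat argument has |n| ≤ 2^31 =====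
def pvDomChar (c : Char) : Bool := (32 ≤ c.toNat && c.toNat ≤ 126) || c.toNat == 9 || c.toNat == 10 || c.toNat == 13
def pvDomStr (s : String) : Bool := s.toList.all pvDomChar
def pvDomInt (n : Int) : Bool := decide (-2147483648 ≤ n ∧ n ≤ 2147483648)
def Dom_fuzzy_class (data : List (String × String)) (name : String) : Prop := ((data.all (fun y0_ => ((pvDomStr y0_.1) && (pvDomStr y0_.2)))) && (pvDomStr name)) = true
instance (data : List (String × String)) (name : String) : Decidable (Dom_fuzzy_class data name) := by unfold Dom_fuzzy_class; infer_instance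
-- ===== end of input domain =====

-- B classifies each key once into a disjoint tier (exact / proper prefix / proper substring), keeping only a count and the first key per tier; same results as A's three match-list scans, proved equal.


-- ===== PORT A =====
-- `data` is a Python dict iterated by key: its keys are the FIRST occurrences of
-- data's first components, in order (PySem.List.dedup).
-- Python's `if exact:` is truthy: false for None AND for the empty-string key,
-- rendered as `(exact.getD "") ≠ ""`.
def fuzzy_class (data : List (String × String)) (name : String) : Option String :=
  let name_l := PySem.Str.lower name
  let keys := PySem.List.dedup (data.map Prod.fst)
  let exact := keys.find? (fun k => PySem.Str.lower k == name_l)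
  if (exact.getD "") ≠ "" then exact
  else
    let m1 := keys.filter (fun k => PySem.Str.startswith (PySem.Str.lower k) name_l)
    if m1.length = 1 then m1.head?
    else
      let m2 := keys.filter (fun k => PySem.Str.isIn name_l (PySem.Str.lower k))
      if m2.length = 1 then m2.head?
      else none

-- ===== PORT B =====
-- B's loop state: per-tier counters and first key of each tier
structure FuzzySt where
  c0 : Nat
  c1 : Nat
  c2 : Nat
  f0 : Option String
  f1 : Option String
  f2 : Option String
deriving Repr, DecidableEq

-- the if/elif chain classifying one key into its (unique) tier
def fuzzyTier (name_l kl : String) : Option Nat :=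
  if kl == name_l then some 0
  else if PySem.Str.startswith kl name_l then some 1
  else if PySem.Str.isIn name_l kl then some 2
  else none

-- loop body: bump the key's tier (counts[t] += 1, firsts[t] kept if already set)
def fuzzyStep (name_l : String) (st : FuzzySt) (k : String) : FuzzySt :=
  match fuzzyTier name_l (PySem.Str.lower k) with
  | none => st
  | some 0 => { st with c0 := st.c0 + 1, f0 := if st.f0.isNone then some k else st.f0 }
  | some 1 => { st with c1 := st.c1 + 1, f1 := if st.f1.isNone then some k else st.f1 }
  | some _ => { st with c2 := st.c2 + 1, f2 := if st.f2.isNone then some k else st.f2 }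

def fuzzy_class_alt (data : List (String × String)) (name : String) : Option String :=
  let name_l := PySem.Str.lower name
  let keys := PySem.List.dedup (data.map Prod.fst)
  let st := keys.foldl (fuzzyStep name_l) ⟨0, 0, 0, none, none, none⟩
  if (st.f0.getD "") ≠ "" then st.f0
  else if st.c0 + st.c1 = 1 then (if st.c0 ≠ 0 then st.f0 else st.f1)
  else if st.c0 + st.c1 + st.c2 = 1 then
    (if st.c0 ≠ 0 then st.f0 else if st.c1 ≠ 0 then st.f1 else st.f2)
  else none

-- ===== PRECONDITION & SPEC =====
def Spec_fuzzy_class (data : List (String × String)) (name : String) (out : Option String) : Prop := out = fuzzy_class_alt data name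
instance (data : List (String × String)) (name : String) (out : Option String) : Decidable (Spec_fuzzy_class data name out) := by unfold Spec_fuzzy_class; infer_instance

-- ===== CLAIM (what is proved, stated in full; the proofs are below) =====
def Claim_equal_fuzzy_class : Prop := ∀ (data : List (String × String)) (name : String), Dom_fuzzy_class data name → Spec_fuzzy_class data name (fuzzy_class data name)

-- ===== LEMMAS AND PROOFS =====

-- tier predicates as standalone Bools
def tP0 (name_l k : String) : Bool := PySem.Str.lower k == name_l
def tPs (name_l k : String) : Bool := PySem.Str.startswith (PySem.Str.lower k) name_l
def tPin (name_l k : String) : Bool := PySem.Str.isIn name_l (PySem.Str.lower k)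
def tP1 (name_l k : String) : Bool := !tP0 name_l k && tPs name_l k
def tP2 (name_l k : String) : Bool := !tP0 name_l k && !tPs name_l k && tPin name_l k

-- exact match implies prefix match
lemma tP0_imp_tPs (name_l k : String) (h : tP0 name_l k = true) : tPs name_l k = true := by
  have : PySem.Str.lower k = name_l := by simpa [tP0] using h
  simp [tPs, this, PySem.Chars.startswith_iff]

-- prefix match implies substring match
lemma tPs_imp_tPin (name_l k : String) (h : tPs name_l k = true) : tPin name_l k = true := by
  simp only [tPs, PySem.Str.startswith_eq, PySem.Chars.startswith_iff] at h
  simp only [tPin, PySem.Str.isIn_eq, PySem.Chars.isIn_iff_infix]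
  exact h.isInfix

-- prefix matches = exact tier ∪ tier 1 (pointwise, via tP0_imp_tPs)
lemma tPs_eq (name_l k : String) : tPs name_l k = (tP0 name_l k || tP1 name_l k) := by
  have h01 := tP0_imp_tPs name_l k
  unfold tP1
  cases h0 : tP0 name_l k <;> cases hs : tPs name_l k <;> simp_all

-- substring matches = prefix matches ∪ tier 2 (pointwise, via tPs_imp_tPin)
lemma tPin_eq (name_l k : String) : tPin name_l k = (tP0 name_l k || tP1 name_l k || tP2 name_l k) := by
  have h01 := tP0_imp_tPs name_l k
  have h12 := tPs_imp_tPin name_l k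
  unfold tP2 tP1
  cases h0 : tP0 name_l k <;> cases hs : tPs name_l k <;> cases hin : tPin name_l k <;> simp_all

-- B's fold computes, for each disjoint tier, its count and its first member
lemma foldl_fuzzyStep (name_l : String) (keys : List String) (st : FuzzySt) :
    keys.foldl (fuzzyStep name_l) st =
      ⟨st.c0 + keys.countP (tP0 name_l), st.c1 + keys.countP (tP1 name_l),
       st.c2 + keys.countP (tP2 name_l),
       st.f0.or (keys.find? (tP0 name_l)), st.f1.or (keys.find? (tP1 name_l)),
       st.f2.or (keys.find? (tP2 name_l))⟩ := by
  induction keys generalizing st with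
  | nil => simp
  | cons k rest ih =>
    obtain ⟨a0, a1, a2, b0, b1, b2⟩ := st
    simp only [List.foldl_cons, ih, List.countP_cons, List.find?]
    have hstep : fuzzyStep name_l ⟨a0, a1, a2, b0, b1, b2⟩ k =
        ⟨a0 + (if tP0 name_l k then 1 else 0), a1 + (if tP1 name_l k then 1 else 0),
         a2 + (if tP2 name_l k then 1 else 0),
         b0.or (if tP0 name_l k then some k else none),
         b1.or (if tP1 name_l k then some k else none),
         b2.or (if tP2 name_l k then some k else none)⟩ := by
      unfold fuzzyStep fuzzyTier tP0 tP1 tP2 tPs tPin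
      cases h0 : PySem.Str.lower k == name_l <;>
        cases hs : PySem.Str.startswith (PySem.Str.lower k) name_l <;>
        cases hin : PySem.Str.isIn name_l (PySem.Str.lower k) <;>
        cases b0 <;> cases b1 <;> cases b2 <;> simp [Option.or, tP0, h0]
    rw [hstep]
    cases h0 : tP0 name_l k <;> cases h1 : tP1 name_l k <;> cases h2 : tP2 name_l k <;>
      simp_all [tP1, tP2] <;> try omega
-- (tiers are mutually exclusive, so at most one branch fires; simp_all closes the impossible ones)

-- counting a union of disjoint predicates
lemma countP_or_disjoint (p q : String → Bool) (l : List String)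
    (h : ∀ k, p k = true → q k = false) :
    l.countP (fun k => p k || q k) = l.countP p + l.countP q := by
  induction l with
  | nil => simp
  | cons x xs ih =>
    simp only [List.countP_cons, ih]
    cases hp : p x <;> cases hq : q x
    · simp
    · simp; omega
    · simp; omega
    · exact absurd (h x hp) (by simp [hq])

-- the first match of a union is the first match of the only inhabited side
lemma find?_or_left (p q : String → Bool) (l : List String)
    (h : l.countP q = 0) :
    l.find? (fun k => p k || q k) = l.find? p := by
  induction l with
  | nil => simp
  | cons x xs ih =>
    simp only [List.countP_cons] at h
    cases hq : q x
    · simp only [hq] at h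
      simp only [List.find?, hq, Bool.or_false]
      cases hp : p x <;> simp [ih (by omega)]
    · simp [hq] at h
lemma find?_or_right (p q : String → Bool) (l : List String)
    (h : l.countP p = 0) :
    l.find? (fun k => p k || q k) = l.find? q := by
  have := find?_or_left q p l h
  simpa [Bool.or_comm] using this

-- ===== VERDICT (by name: the statement is the Claim_ definition above) =====
theorem fuzzy_class_spec : Claim_equal_fuzzy_class := by
  intro data name _
  show fuzzy_class data name = fuzzy_class_alt data name
  simp only [fuzzy_class, fuzzy_class_alt]
  set name_l := PySem.Str.lower name
  set keys := PySem.List.dedup (data.map Prod.fst) with hkeys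
  clear hkeys
  rw [foldl_fuzzyStep]
  simp only [Nat.zero_add, Option.none_or]
  -- identify A's three scan predicates with the disjoint-tier decomposition
  have e1 : (fun k => PySem.Str.startswith (PySem.Str.lower k) name_l)
      = (fun k => tP0 name_l k || tP1 name_l k) := funext (tPs_eq name_l)
  have e2 : (fun k => PySem.Str.isIn name_l (PySem.Str.lower k))
      = (fun k => (tP0 name_l k || tP1 name_l k) || tP2 name_l k) :=
    funext (fun k => tPin_eq name_l k)
  have e0 : (fun k => PySem.Str.lower k == name_l) = tP0 name_l := rfl
  rw [e0, e1, e2, List.head?_filter, List.head?_filter,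
      ← List.countP_eq_length_filter, ← List.countP_eq_length_filter]
  have hd01 : ∀ k, tP0 name_l k = true → tP1 name_l k = false := by
    intro k h; simp [tP1, h]
  have hd012 : ∀ k, (tP0 name_l k || tP1 name_l k) = true → tP2 name_l k = false := by
    intro k h
    rcases Bool.or_eq_true_iff.mp h with h0 | h1
    · simp [tP2, h0]
    · simp [tP1] at h1; simp [tP2, h1.2]
  rw [countP_or_disjoint _ _ _ hd012, countP_or_disjoint _ _ _ hd01]
  split_ifs with h1 h2 h3 h4 h5 h6
  all_goals try rfl
  all_goals try (exfalso; omega)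
  -- the surviving branches: a singleton union tier, whose first member is the
  -- first member of its only inhabited side
  all_goals
    first
      | exact find?_or_left _ _ _ (by omega)
      | exact find?_or_right _ _ _ (by omega)
      | exact find?_or_right _ _ _ (by rw [countP_or_disjoint _ _ _ hd01]; omega)
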